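-- pv_equiv track=rewrite | github.com/Abey21/advanced-netman | scripts/ping_webserver.py | filter_devices
-- ===== SOURCE A (Python) =====
-- def filter_devices(devices, include_list: str = "", exclude_list: str = ""):
--     if include_list:
--         inc = {d.strip() for d in include_list.split(",") if d.strip()}
--         devices = [d for d in devices if d["name"] in inc]
--     if exclude_list:
--         exc = {d.strip() for d in exclude_list.split(",") if d.strip()}
--         devices = [d for d in devices if d["name"] not in exc]
--     return devices
-- ===== SOURCE B (Python) =====
-- def filter_devices(devices, include_list: str = "", exclude_list: str = ""):
--     if not include_list and not exclude_list:
--         return devices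
--     def parse(s):
--         return {t.strip() for t in s.split(",") if t.strip()}
--     keep = parse(include_list) if include_list else {d["name"] for d in devices}
--     if exclude_list:
--         keep -= parse(exclude_list)
--     return [d for d in devices if d["name"] in keep]
-- ===== Notes on version B (the rewrite author's own statement) =====
-- stated objective: alternative
-- what changed: B does set algebra on names first -- it builds one 'keep' set (the include set, or the universe of device names, minus the exclude set) -- and then filters the devices once with a single membership test, instead of A's two sequential filtering passes each with its own membership predicate.
import Mathlib
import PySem

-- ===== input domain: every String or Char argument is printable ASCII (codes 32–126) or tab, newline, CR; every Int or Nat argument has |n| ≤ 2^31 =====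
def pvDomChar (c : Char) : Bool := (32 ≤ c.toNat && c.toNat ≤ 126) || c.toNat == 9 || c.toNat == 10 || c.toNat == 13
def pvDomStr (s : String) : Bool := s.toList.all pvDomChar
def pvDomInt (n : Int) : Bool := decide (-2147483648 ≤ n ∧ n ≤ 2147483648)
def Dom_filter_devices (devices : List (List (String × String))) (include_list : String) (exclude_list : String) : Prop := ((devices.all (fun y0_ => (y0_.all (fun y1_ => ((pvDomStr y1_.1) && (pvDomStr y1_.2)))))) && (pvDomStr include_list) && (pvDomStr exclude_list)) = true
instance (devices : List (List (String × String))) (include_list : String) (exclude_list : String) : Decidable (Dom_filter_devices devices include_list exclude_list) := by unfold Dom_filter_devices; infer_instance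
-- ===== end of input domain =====

-- B computes one 'keep' set by set algebra on names (include set or universe of device
-- names, minus the exclude set) and filters the devices once, instead of A's two
-- sequential filtering passes (alternative decomposition, same cost).


-- ===== PORT A =====
-- d["name"]; total form of the lookup, exact under Pre_ (which guarantees the key is
-- present whenever a lookup happens)
def pvName (d : List (String × String)) : String := PySem.Dict.getD (PySem.Dict.mk d) "name" ""

def filter_devices (devices : List (List (String × String))) (include_list : String) (exclude_list : String) : List (List (String × String)) :=
  let devices :=
    if include_list ≠ "" then
      let inc := PySem.Set.ofList (((((PySem.Str.split? include_list ",").getD [])).map PySem.Str.strip).filter (fun t => t ≠ ""))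
      devices.filter (fun d => PySem.Set.contains inc (pvName d))
    else devices
  if exclude_list ≠ "" then
    let exc := PySem.Set.ofList (((((PySem.Str.split? exclude_list ",").getD [])).map PySem.Str.strip).filter (fun t => t ≠ ""))
    devices.filter (fun d => !(PySem.Set.contains exc (pvName d)))
  else devices

-- ===== PORT B =====
-- {t.strip() for t in s.split(",") if t.strip()}
def pvParseNames (s : String) : PySem.Set String :=
  PySem.Set.ofList (((((PySem.Str.split? s ",").getD [])).map PySem.Str.strip).filter (fun t => t ≠ ""))

def filter_devices_alt (devices : List (List (String × String))) (include_list : String) (exclude_list : String) : List (List (String × String)) :=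
  if include_list = "" ∧ exclude_list = "" then devices
  else
    let keep : PySem.Set String :=
      if include_list ≠ "" then pvParseNames include_list
      else PySem.Set.ofList (devices.map pvName)
    let keep : PySem.Set String :=
      if exclude_list ≠ "" then PySem.Set.diff keep (pvParseNames exclude_list) else keep
    devices.filter (fun d => PySem.Set.contains keep (pvName d))

-- ===== PRECONDITION & SPEC =====
-- Pre_ excludes exactly the inputs where A raises KeyError: some device lacking the
-- "name" key while at least one of the two filter strings is non-empty (B raises there too).
def Pre_filter_devices (devices : List (List (String × String))) (include_list : String) (exclude_list : String) : Prop :=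
  (include_list = "" ∧ exclude_list = "") ∨ ∀ d ∈ devices, (PySem.Dict.get? (PySem.Dict.mk d) "name").isSome
instance (devices : List (List (String × String))) (include_list : String) (exclude_list : String) : Decidable (Pre_filter_devices devices include_list exclude_list) := by unfold Pre_filter_devices; infer_instance

def pvWitness_filter_devices : (List (List (String × String))) × String × String :=
  ([[("name", "r1")], [("name", "r2")]], "r1, r3", "r2")

def Spec_filter_devices (devices : List (List (String × String))) (include_list : String) (exclude_list : String) (out : List (List (String × String))) : Prop := out = filter_devices_alt devices include_list exclude_list
instance (devices : List (List (String × String))) (include_list : String) (exclude_list : String) (out : List (List (String × String))) : Decidable (Spec_filter_devices devices include_list exclude_list out) := by unfold Spec_filter_devices; infer_instance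

-- ===== CLAIM =====
def Claim_equal_filter_devices : Prop := ∀ (devices : List (List (String × String))) (include_list : String) (exclude_list : String), Dom_filter_devices devices include_list exclude_list → Pre_filter_devices devices include_list exclude_list → Spec_filter_devices devices include_list exclude_list (filter_devices devices include_list exclude_list)

-- ===== LEMMAS AND PROOFS =====
theorem pv_contains_diff (s t : PySem.Set String) (x : String) :
    PySem.Set.contains (PySem.Set.diff s t) x
      = (PySem.Set.contains s x && !PySem.Set.contains t x) := by
  apply Bool.eq_iff_iff.mpr
  simp [PySem.Set.contains_iff, PySem.Set.mem_diff]

theorem pv_contains_universe (devices : List (List (String × String)))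
    (d : List (String × String)) (hd : d ∈ devices) :
    PySem.Set.contains (PySem.Set.ofList (devices.map pvName)) (pvName d) = true := by
  simp [PySem.Set.contains_iff, PySem.Set.mem_ofList]
  exact ⟨d, hd, rfl⟩

-- ===== VERDICT =====
theorem filter_devices_spec : Claim_equal_filter_devices := by
  intro devices inc exc _ _
  show filter_devices devices inc exc = filter_devices_alt devices inc exc
  unfold filter_devices filter_devices_alt
  by_cases hi : inc = "" <;> by_cases he : exc = ""
  · simp [hi, he]
  · -- include empty, exclude non-empty: keep = universe - exc
    simp only [hi, he, if_neg, ite_true, ite_false, ne_eq, not_true_eq_false,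
      not_false_eq_true, if_true, if_false, and_false]
    refine (List.filter_congr ?_).symm
    intro d hd
    rw [pv_contains_diff, pv_contains_universe devices d hd]
    simp [pvParseNames]
  · simp [hi, he, pvParseNames]
  · -- both non-empty: two passes = one pass over inc - exc
    simp only [hi, he, ne_eq, not_false_eq_true, if_true, false_and, if_false,
      List.filter_filter]
    refine (List.filter_congr ?_).symm
    intro d _
    rw [pv_contains_diff]
    simp [pvParseNames, Bool.and_comm]
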